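-- pv_equiv track=rewrite | github.com/fatyo777/steel-cutter-web | app.py | simplify_combo
-- ===== SOURCE A (Python) =====
-- from collections import defaultdict, Counter
--
-- def simplify_combo(combo):
--     count = Counter(combo)
--     parts = []
--     for length in sorted(count.keys(), reverse=True):
--         qty = count[length]
--         if qty > 1:
--             parts.append(f"{length}*{qty}")
--         else:
--             parts.append(f"{length}")
--     return ' + '.join(parts)
-- ===== SOURCE B (Python) =====
-- def simplify_combo(combo):
--     s = sorted(combo, reverse=True)
--     parts = []
--     i = 0
--     n = len(s)
--     while i < n:
--         j = i
--         while j < n and s[j] == s[i]: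
--             j += 1
--         qty = j - i
--         parts.append(f"{s[i]}*{qty}" if qty > 1 else f"{s[i]}")
--         i = j
--     return ' + '.join(parts)
-- ===== Notes on version B (the rewrite author's own statement) =====
-- stated objective: alternative
-- what changed: Replaces the Counter frequency dict plus a separate sort of its keys by sorting the whole list descending once and emitting run-length groups in a single scan.
import Mathlib
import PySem

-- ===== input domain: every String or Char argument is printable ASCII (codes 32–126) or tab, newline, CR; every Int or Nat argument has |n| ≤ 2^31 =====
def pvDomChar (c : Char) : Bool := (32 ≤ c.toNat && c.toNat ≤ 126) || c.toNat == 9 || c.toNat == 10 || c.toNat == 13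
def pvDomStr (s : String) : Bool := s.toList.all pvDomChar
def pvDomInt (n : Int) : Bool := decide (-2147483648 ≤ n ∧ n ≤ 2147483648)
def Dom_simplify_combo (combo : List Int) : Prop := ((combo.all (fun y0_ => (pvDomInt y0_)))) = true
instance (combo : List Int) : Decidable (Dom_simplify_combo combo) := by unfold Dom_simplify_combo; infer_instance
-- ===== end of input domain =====

-- B replaces the Counter + separate key sort by one descending sort followed by a single run-length scan (alternative decomposition, same cost).

-- shared formatting of one part: f"{length}*{qty}" if qty > 1 else f"{length}"
def pvFmt (length qty : Int) : String :=
  if qty > 1 then PySem.Int.toStr length ++ "*" ++ PySem.Int.toStr qty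
  else PySem.Int.toStr length

-- ===== PORT A =====
-- count = Counter(combo); for length in sorted(count.keys(), reverse=True): append part; ' + '.join
-- (count[length] always hits an existing key, so getD 0 is exact)
def simplify_combo (combo : List Int) : String :=
  let count := PySem.Dict.counter combo
  let parts := (PySem.List.sorted count.keys (fun x => x) true).foldl
      (fun parts length => parts ++ [pvFmt length (count.getD length 0)]) ([] : List String)
  PySem.Str.join " + " parts

-- ===== PORT B =====
-- the inner 'while j < n and s[j] == s[i]' scan of Source B: the run is takeWhile, the loop resumes at dropWhile
def pvRunParts : List Int → List String
  | [] => []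
  | x :: xs =>
    pvFmt x (((xs.takeWhile (fun y => y == x)).length : Int) + 1)
      :: pvRunParts (xs.dropWhile (fun y => y == x))
termination_by t => t.length
decreasing_by
  exact Nat.lt_succ_of_le (List.length_dropWhile_le _ _)

def simplify_combo_alt (combo : List Int) : String :=
  PySem.Str.join " + " (pvRunParts (PySem.List.sorted combo (fun x => x) true))

-- ===== PRECONDITION & SPEC =====
def Spec_simplify_combo (combo : List Int) (out : String) : Prop := out = simplify_combo_alt combo
instance (combo : List Int) (out : String) : Decidable (Spec_simplify_combo combo out) := by unfold Spec_simplify_combo; infer_instance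

-- ===== CLAIM (what is proved, stated in full; the proofs are below) =====
def Claim_equal_simplify_combo : Prop := ∀ (combo : List Int), Dom_simplify_combo combo → Spec_simplify_combo combo (simplify_combo combo)

-- ===== LEMMAS AND PROOFS =====

-- proof-side: the distinct values of the runs, in scan order
def pvRunKeys : List Int → List Int
  | [] => []
  | x :: xs => x :: pvRunKeys (xs.dropWhile (fun y => y == x))
termination_by t => t.length
decreasing_by
  exact Nat.lt_succ_of_le (List.length_dropWhile_le _ _)

theorem pvRunKeys_mem (t : List Int) (k : Int) : k ∈ pvRunKeys t ↔ k ∈ t := by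
  induction t using pvRunKeys.induct with
  | case1 => simp [pvRunKeys]
  | case2 x xs ih =>
    rw [pvRunKeys]
    constructor
    · intro h
      rcases List.mem_cons.mp h with h | h
      · simp [h]
      · have := (ih.mp h)
        have : k ∈ xs := (List.dropWhile_sublist _).mem this
        simp [this]
    · intro h
      rcases List.mem_cons.mp h with h | h
      · simp [h]
      · rcases (by rw [List.takeWhile_append_dropWhile]; exact h :
            k ∈ xs.takeWhile (fun y => y == x) ++ xs.dropWhile (fun y => y == x)) |> List.mem_append.mp with h' | h'
        · have : k = x := by simpa using List.mem_takeWhile_imp h'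
          simp [this]
        · exact List.mem_cons.mpr (Or.inr (ih.mpr h'))

-- on a descending list, the first run's value never reappears after the run
theorem pv_not_mem_rest {x : Int} {xs : List Int}
    (hp : List.Pairwise (fun a b : Int => b ≤ a) (x :: xs)) :
    x ∉ xs.dropWhile (fun y => y == x) := by
  intro hmem
  set rest := xs.dropWhile (fun y => y == x) with hr
  have hne : rest ≠ [] := by intro h; rw [h] at hmem; exact absurd hmem (List.not_mem_nil)
  have hhead : ((rest.head hne) == x) = false := List.head_dropWhile_not _ hne
  have hheadne : rest.head hne ≠ x := by simpa using hhead
  -- rest is a sublist of xs, so its elements are ≤ x and it is pairwise descending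
  have hsubl : rest.Sublist xs := List.dropWhile_sublist _
  have hle : ∀ y ∈ xs, y ≤ x := by
    intro y hy; exact (List.pairwise_cons.mp hp).1 y hy
  have hpxs : List.Pairwise (fun a b : Int => b ≤ a) xs := (List.pairwise_cons.mp hp).2
  have hprest : List.Pairwise (fun a b : Int => b ≤ a) rest := hpxs.sublist hsubl
  -- head ≥ every element of rest; x ∈ rest gives x ≤ head ≤ x, forcing head = x
  obtain ⟨r, rs, hcons⟩ := List.exists_cons_of_ne_nil hne
  have hhr : rest.head hne = r := by simp [hcons]
  rw [hcons] at hmem hprest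
  rcases List.mem_cons.mp hmem with h | h
  · exact hheadne (by rw [hhr, h])
  · have hxr : x ≤ r := (List.pairwise_cons.mp hprest).1 x h
    have hrx : r ≤ x := hle r ((List.Sublist.mem (by simp [hcons] : r ∈ rest) hsubl))
    exact hheadne (by rw [hhr]; omega)

theorem pvRunKeys_pairwise (t : List Int)
    (hp : List.Pairwise (fun a b : Int => b ≤ a) t) :
    List.Pairwise (fun a b : Int => b < a) (pvRunKeys t) := by
  induction t using pvRunKeys.induct with
  | case1 => simp [pvRunKeys]
  | case2 x xs ih =>
    rw [pvRunKeys]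
    have hpxs := (List.pairwise_cons.mp hp).2
    have hle := (List.pairwise_cons.mp hp).1
    have hprest : List.Pairwise (fun a b : Int => b ≤ a) (xs.dropWhile (fun y => y == x)) :=
      hpxs.sublist (List.dropWhile_sublist _)
    refine List.pairwise_cons.mpr ⟨?_, ih hprest⟩
    intro k hk
    have hkrest : k ∈ xs.dropWhile (fun y => y == x) := (pvRunKeys_mem _ _).mp hk
    have hkx : k ≤ x := hle k ((List.dropWhile_sublist _).mem hkrest)
    have hne : k ≠ x := by
      intro h; exact pv_not_mem_rest hp (h ▸ hkrest)
    omega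

theorem pvRunKeys_nodup (t : List Int)
    (hp : List.Pairwise (fun a b : Int => b ≤ a) t) : (pvRunKeys t).Nodup :=
  (pvRunKeys_pairwise t hp).imp (by intro a b h; omega)

-- the run scan computes, for each distinct value in order, its total count
theorem pvRunParts_eq_map (t : List Int)
    (hp : List.Pairwise (fun a b : Int => b ≤ a) t) :
    pvRunParts t = (pvRunKeys t).map (fun k => pvFmt k ((t.count k : Int))) := by
  induction t using pvRunParts.induct with
  | case1 => simp [pvRunParts, pvRunKeys]
  | case2 x xs ih =>
    rw [pvRunParts, pvRunKeys, List.map_cons]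
    set g := xs.takeWhile (fun y => y == x) with hg
    set rest := xs.dropWhile (fun y => y == x) with hr
    have hpxs := (List.pairwise_cons.mp hp).2
    have hprest : List.Pairwise (fun a b : Int => b ≤ a) rest :=
      hpxs.sublist (List.dropWhile_sublist _)
    have hxrest : x ∉ rest := pv_not_mem_rest hp
    have hsplit : g ++ rest = xs := List.takeWhile_append_dropWhile
    -- count of x in the whole list is the run length + 1
    have hcountg : g.count x = g.length := by
      rw [List.count_eq_length]
      intro b hb
      rw [hg] at hb
      have hbx := List.mem_takeWhile_imp hb
      exact (eq_of_beq hbx).symm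
    have hcount : (x :: xs).count x = g.length + 1 := by
      rw [List.count_cons_self, ← hsplit, List.count_append, hcountg,
        List.count_eq_zero.mpr hxrest]
    -- later keys keep their count: they do not occur in the first run nor equal x
    have hmapeq : (pvRunKeys rest).map (fun k => pvFmt k ((rest.count k : Int)))
        = (pvRunKeys rest).map (fun k => pvFmt k (((x :: xs).count k : Int))) := by
      apply List.map_congr_left
      intro k hk
      have hkrest : k ∈ rest := (pvRunKeys_mem _ _).mp hk
      have hkx : k ≠ x := by intro h; exact hxrest (h ▸ hkrest)
      have hkg : k ∉ g := by
        intro h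
        exact hkx (by simpa using List.mem_takeWhile_imp h)
      have : (x :: xs).count k = rest.count k := by
        rw [List.count_cons_of_ne (by simpa [eq_comm] using hkx), ← hsplit,
          List.count_append, List.count_eq_zero.mpr hkg, Nat.zero_add]
      rw [this]
    rw [ih hprest, hmapeq, hcount]
    push_cast
    rfl

theorem simplify_combo_eq (combo : List Int) :
    simplify_combo combo = simplify_combo_alt combo := by
  unfold simplify_combo simplify_combo_alt
  set s := PySem.List.sorted combo (fun x => x) true with hs
  show PySem.Str.join " + "
      (List.foldl (fun parts length => parts ++ [pvFmt length ((PySem.Dict.counter combo).getD length 0)]) []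
        (PySem.List.sorted (PySem.Dict.counter combo).keys (fun x => x) true))
    = PySem.Str.join " + " (pvRunParts s)
  have hps : List.Pairwise (fun a b : Int => b ≤ a) s :=
    PySem.List.sorted_pairwise_rev combo (fun x => x)
  -- A's sorted key list is exactly the run-key list of the sorted input
  have hkeys : PySem.List.sorted (PySem.Dict.counter combo).keys (fun x => x) true
      = pvRunKeys s := by
    rw [PySem.Dict.keys_counter]
    apply PySem.List.sorted_rev_eq_of_perm_of_pairwise_gt
    · rw [List.perm_ext_iff_of_nodup (pvRunKeys_nodup s hps) (PySem.Set.nodup_ofList combo)]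
      intro a
      rw [pvRunKeys_mem, PySem.Set.mem_ofList, hs, PySem.List.mem_sorted]
    · exact pvRunKeys_pairwise s hps
  rw [hkeys, PySem.List.foldl_append_singleton_eq_map (fun length =>
      pvFmt length ((PySem.Dict.counter combo).getD length 0)), List.nil_append]
  rw [pvRunParts_eq_map s hps]
  congr 1
  apply List.map_congr_left
  intro k _
  rw [PySem.Dict.getD_counter]
  have : s.count k = combo.count k := (PySem.List.sorted_perm combo (fun x => x) true).count_eq k
  rw [this]

-- ===== VERDICT (by name: the statement is the Claim_ definition above) =====
theorem simplify_combo_spec : Claim_equal_simplify_combo := by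
  intro combo _
  unfold Spec_simplify_combo
  exact simplify_combo_eq combo
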